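-- pv_equiv track=rewrite | github.com/rifqieali/analisis_sentimen_MBG | absaMBG.py | get_aspects
-- ===== SOURCE A (Python) =====
-- def get_aspects(text):
--     aspects = []
--     text_words = set(str(text).split())
--     keywords = {
--         'Kualitas': ["kualitas", "bagus", "jelek", "enak", "basi", "gizi", "susu",
--         "menu", "rasa", "porsi", "higienis", "keracunan", "sehat",
--         "mentah", "keras", "hambar", "ulat", "lauk", "sayur",
--         "karbohidrat", "protein", "lemak", "gula", "ayam", "telur",
--         "kenyang", "alergi", "higienitas"],
--
--         'Layanan': ["layan", "antri", "ramah", "lambat", "cepat", "bantu", "saji",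
--         "distribusi", "vendor", "katering", "sekolah", "siswa", "guru",
--         "telat", "molor", "bocor", "tepat waktu", "pelosok", "merata",
--         "zonasi", "umkm", "kemasan", "kotak", "plastik"],
--
--         'Anggaran': ["harga", "mahal", "murah", "biaya", "bayar", "anggar", "boros",
--         "korupsi", "dana", "apbn", "pajak", "potong", "sunat", "markup",
--         "tender", "proyek", "apbd", "defisit", "utang", "ekonomi",
--         "alokasi", "transparan"]
--     }
--     for aspect, keys in keywords.items():
--         if not text_words.isdisjoint(keys):
--             aspects.append(aspect)
--     return aspects if aspects else ['Lainnya']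
-- ===== SOURCE B (Python) =====
-- # Table-driven: one flat keyword -> bit table, a bitmask accumulated over the
-- # words in a single pass, then the mask decoded into aspect names.
-- _TABLE = {
--     'kualitas': 1, 'bagus': 1, 'jelek': 1, 'enak': 1, 'basi': 1, 'gizi': 1,
--     'susu': 1, 'menu': 1, 'rasa': 1, 'porsi': 1, 'higienis': 1, 'keracunan': 1,
--     'sehat': 1, 'mentah': 1, 'keras': 1, 'hambar': 1, 'ulat': 1, 'lauk': 1,
--     'sayur': 1, 'karbohidrat': 1, 'protein': 1, 'lemak': 1, 'gula': 1, 'ayam': 1,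
--     'telur': 1, 'kenyang': 1, 'alergi': 1, 'higienitas': 1,
--     'layan': 2, 'antri': 2, 'ramah': 2, 'lambat': 2, 'cepat': 2, 'bantu': 2,
--     'saji': 2, 'distribusi': 2, 'vendor': 2, 'katering': 2, 'sekolah': 2, 'siswa': 2,
--     'guru': 2, 'telat': 2, 'molor': 2, 'bocor': 2, 'tepat waktu': 2, 'pelosok': 2,
--     'merata': 2, 'zonasi': 2, 'umkm': 2, 'kemasan': 2, 'kotak': 2, 'plastik': 2,
--     'harga': 4, 'mahal': 4, 'murah': 4, 'biaya': 4, 'bayar': 4, 'anggar': 4,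
--     'boros': 4, 'korupsi': 4, 'dana': 4, 'apbn': 4, 'pajak': 4, 'potong': 4,
--     'sunat': 4, 'markup': 4, 'tender': 4, 'proyek': 4, 'apbd': 4, 'defisit': 4,
--     'utang': 4, 'ekonomi': 4, 'alokasi': 4, 'transparan': 4,}
--
-- def get_aspects(text):
--     mask = 0
--     for w in str(text).split():
--         mask |= _TABLE.get(w, 0)
--     if mask == 0:
--         return ['Lainnya']
--     return [name for name, bit in [('Kualitas', 1), ('Layanan', 2), ('Anggaran', 4)]
--             if mask & bit]
-- ===== Notes on version B (the rewrite author's own statement) =====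
-- stated objective: alternative
-- what changed: Replaces the per-aspect set-disjointness scans with a flat keyword-to-bit table: one pass over the words ORs bits into an integer mask, which is then decoded into the aspect names in fixed order.
import Mathlib
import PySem

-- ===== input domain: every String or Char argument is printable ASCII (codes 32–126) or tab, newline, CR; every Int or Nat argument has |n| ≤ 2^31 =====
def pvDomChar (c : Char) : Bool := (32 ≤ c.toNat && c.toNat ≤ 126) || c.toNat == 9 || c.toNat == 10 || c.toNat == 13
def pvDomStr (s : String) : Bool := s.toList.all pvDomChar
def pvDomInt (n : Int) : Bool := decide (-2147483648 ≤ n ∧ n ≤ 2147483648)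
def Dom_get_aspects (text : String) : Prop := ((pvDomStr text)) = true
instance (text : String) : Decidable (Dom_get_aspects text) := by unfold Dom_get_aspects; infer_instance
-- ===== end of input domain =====

-- B replaces A's per-aspect set-disjointness scans by a flat keyword→bit table, a bitmask
-- accumulated in one pass over the words, and an O(1) decode (objective: alternative);
-- the return value is identical.

-- ===== PORT A =====
-- A-side keyword literals (from the source)
def pvKeysKualitas : List String :=
  ["kualitas", "bagus", "jelek", "enak", "basi", "gizi", "susu",
   "menu", "rasa", "porsi", "higienis", "keracunan", "sehat",
   "mentah", "keras", "hambar", "ulat", "lauk", "sayur",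
   "karbohidrat", "protein", "lemak", "gula", "ayam", "telur",
   "kenyang", "alergi", "higienitas"]
def pvKeysLayanan : List String :=
  ["layan", "antri", "ramah", "lambat", "cepat", "bantu", "saji",
   "distribusi", "vendor", "katering", "sekolah", "siswa", "guru",
   "telat", "molor", "bocor", "tepat waktu", "pelosok", "merata",
   "zonasi", "umkm", "kemasan", "kotak", "plastik"]
def pvKeysAnggaran : List String :=
  ["harga", "mahal", "murah", "biaya", "bayar", "anggar", "boros",
   "korupsi", "dana", "apbn", "pajak", "potong", "sunat", "markup",
   "tender", "proyek", "apbd", "defisit", "utang", "ekonomi",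
   "alokasi", "transparan"]

def get_aspects (text : String) : List String :=
  let text_words : PySem.Set String := PySem.Set.ofList (PySem.Str.split₀ text)
  let keywords : PySem.Dict String (List String) :=
    PySem.Dict.mk [("Kualitas", pvKeysKualitas), ("Layanan", pvKeysLayanan),
                   ("Anggaran", pvKeysAnggaran)]
  let aspects : List String :=
    keywords.items.foldl
      (fun acc p => if !(PySem.Set.isdisjoint text_words p.2) then acc ++ [p.1] else acc) []
  if aspects = [] then ["Lainnya"] else aspects

-- ===== PORT B =====
-- _TABLE: the flat keyword → bit dict literal from Source B
def pvTable : PySem.Dict String Int := PySem.Dict.mk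
  [   ("kualitas", 1), ("bagus", 1), ("jelek", 1), ("enak", 1), ("basi", 1),
   ("gizi", 1), ("susu", 1), ("menu", 1), ("rasa", 1), ("porsi", 1),
   ("higienis", 1), ("keracunan", 1), ("sehat", 1), ("mentah", 1), ("keras", 1),
   ("hambar", 1), ("ulat", 1), ("lauk", 1), ("sayur", 1), ("karbohidrat", 1),
   ("protein", 1), ("lemak", 1), ("gula", 1), ("ayam", 1), ("telur", 1),
   ("kenyang", 1), ("alergi", 1), ("higienitas", 1),
   ("layan", 2), ("antri", 2), ("ramah", 2), ("lambat", 2), ("cepat", 2),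
   ("bantu", 2), ("saji", 2), ("distribusi", 2), ("vendor", 2), ("katering", 2),
   ("sekolah", 2), ("siswa", 2), ("guru", 2), ("telat", 2), ("molor", 2),
   ("bocor", 2), ("tepat waktu", 2), ("pelosok", 2), ("merata", 2), ("zonasi", 2),
   ("umkm", 2), ("kemasan", 2), ("kotak", 2), ("plastik", 2),
   ("harga", 4), ("mahal", 4), ("murah", 4), ("biaya", 4), ("bayar", 4),
   ("anggar", 4), ("boros", 4), ("korupsi", 4), ("dana", 4), ("apbn", 4),
   ("pajak", 4), ("potong", 4), ("sunat", 4), ("markup", 4), ("tender", 4),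
   ("proyek", 4), ("apbd", 4), ("defisit", 4), ("utang", 4), ("ekonomi", 4),
   ("alokasi", 4), ("transparan", 4)]

def get_aspects_alt (text : String) : List String :=
  let mask : Int :=
    (PySem.Str.split₀ text).foldl (fun m w => PySem.Int.bor m (pvTable.getD w 0)) 0
  if mask = 0 then ["Lainnya"]
  else [("Kualitas", (1 : Int)), ("Layanan", 2), ("Anggaran", 4)].filterMap
    (fun p => if PySem.Int.band mask p.2 ≠ 0 then some p.1 else none)

-- ===== PRECONDITION & SPEC =====
def Spec_get_aspects (text : String) (out : List String) : Prop := out = get_aspects_alt text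
instance (text : String) (out : List String) : Decidable (Spec_get_aspects text out) := by unfold Spec_get_aspects; infer_instance

-- ===== CLAIM =====
def Claim_equal_get_aspects : Prop := ∀ (text : String), Dom_get_aspects text → Spec_get_aspects text (get_aspects text)

-- ===== LEMMAS AND PROOFS =====

-- canonical mask value from the three "aspect hit" booleans
def pvCanon (k l a : Bool) : Int :=
  (if k then 1 else 0) + (if l then 2 else 0) + (if a then 4 else 0)

-- get? on a dict literal whose items start with xs each mapped to the constant v
theorem pv_get?_mk_map_append (xs : List String) (v : Int)
    (rest : List (String × Int)) (w : String) :
    (PySem.Dict.mk (xs.map (fun s => (s, v)) ++ rest)).get? w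
      = if w ∈ xs then some v else (PySem.Dict.mk rest).get? w := by
  induction xs with
  | nil => simp
  | cons x t ih =>
      simp only [List.map_cons, List.cons_append, PySem.Dict.get?_mk_cons, ih, List.mem_cons]
      by_cases h1 : x = w
      · subst h1; simp
      · have : ¬ w = x := fun h => h1 h.symm
        simp [h1, this]

-- the flat table IS the three keyword lists tagged 1, 2, 4
theorem pv_table_items : pvTable = PySem.Dict.mk
    (pvKeysKualitas.map (fun s => (s, (1 : Int)))
      ++ (pvKeysLayanan.map (fun s => (s, (2 : Int)))
      ++ pvKeysAnggaran.map (fun s => (s, (4 : Int))))) := by decide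

theorem pv_lookup_char (w : String) :
    pvTable.getD w 0
      = if w ∈ pvKeysKualitas then 1
        else if w ∈ pvKeysLayanan then 2
        else if w ∈ pvKeysAnggaran then 4
        else 0 := by
  rw [pv_table_items, PySem.Dict.getD_eq_get?_getD, pv_get?_mk_map_append,
      pv_get?_mk_map_append,
      show pvKeysAnggaran.map (fun s => (s, (4 : Int)))
            = pvKeysAnggaran.map (fun s => (s, (4 : Int))) ++ [] from (List.append_nil _).symm,
      pv_get?_mk_map_append]
  split_ifs <;> rfl

-- the three keyword lists are pairwise disjoint
theorem pv_disjKL : ∀ w ∈ pvKeysKualitas, (w ∈ pvKeysLayanan) = False := by decide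
theorem pv_disjKA : ∀ w ∈ pvKeysKualitas, (w ∈ pvKeysAnggaran) = False := by decide
theorem pv_disjLA : ∀ w ∈ pvKeysLayanan, (w ∈ pvKeysAnggaran) = False := by decide

-- "some word hits this keyword list", as a Bool
def pvAny (ws keys : List String) : Bool := ws.any (fun w => decide (w ∈ keys))

theorem pv_or_canon (k l a : Bool) (w : String) :
    PySem.Int.bor (pvCanon k l a) (pvTable.getD w 0)
      = pvCanon (k || decide (w ∈ pvKeysKualitas))
                (l || decide (w ∈ pvKeysLayanan))
                (a || decide (w ∈ pvKeysAnggaran)) := by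
  rw [pv_lookup_char]
  by_cases hK : w ∈ pvKeysKualitas
  · simp only [hK, if_true, decide_true, pv_disjKL w hK, pv_disjKA w hK, decide_false]
    cases k <;> cases l <;> cases a <;> decide
  · by_cases hL : w ∈ pvKeysLayanan
    · simp only [hK, hL, if_false, if_true, decide_true, decide_false, pv_disjLA w hL]
      cases k <;> cases l <;> cases a <;> decide
    · by_cases hA : w ∈ pvKeysAnggaran
      · simp only [hK, hL, hA, if_false, if_true, decide_true, decide_false]
        cases k <;> cases l <;> cases a <;> decide
      · simp only [hK, hL, hA, if_false, decide_false]
        cases k <;> cases l <;> cases a <;> decide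

theorem pv_fold_mask (ws : List String) (k l a : Bool) :
    ws.foldl (fun m w => PySem.Int.bor m (pvTable.getD w 0)) (pvCanon k l a)
      = pvCanon (k || pvAny ws pvKeysKualitas)
                (l || pvAny ws pvKeysLayanan)
                (a || pvAny ws pvKeysAnggaran) := by
  induction ws generalizing k l a with
  | nil => simp [pvAny]
  | cons w t ih =>
      rw [List.foldl_cons, pv_or_canon, ih]
      simp [pvAny, Bool.or_assoc]

theorem pv_hit_eq (ws keys : List String) :
    (!(PySem.Set.isdisjoint (PySem.Set.ofList ws) keys)) = pvAny ws keys := by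
  rw [Bool.eq_iff_iff, pvAny, List.any_eq_true, Bool.not_eq_eq_eq_not, Bool.not_true,
      ← Bool.not_eq_true, PySem.Set.isdisjoint_iff]
  push Not
  constructor
  · rintro ⟨x, hx, hk⟩; exact ⟨x, (PySem.Set.mem_ofList ws x).mp hx, by simpa using hk⟩
  · rintro ⟨x, hx, hk⟩; exact ⟨x, (PySem.Set.mem_ofList ws x).mpr hx, by simpa using hk⟩

theorem get_aspects_eq_alt (text : String) : get_aspects text = get_aspects_alt text := by
  unfold get_aspects get_aspects_alt
  have hm : (PySem.Str.split₀ text).foldl (fun m w => PySem.Int.bor m (pvTable.getD w 0)) 0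
      = pvCanon (pvAny (PySem.Str.split₀ text) pvKeysKualitas)
                (pvAny (PySem.Str.split₀ text) pvKeysLayanan)
                (pvAny (PySem.Str.split₀ text) pvKeysAnggaran) := by
    have := pv_fold_mask (PySem.Str.split₀ text) false false false
    simpa [pvCanon] using this
  simp only [hm, List.foldl_cons, List.foldl_nil, pv_hit_eq]
  generalize pvAny (PySem.Str.split₀ text) pvKeysKualitas = b1
  generalize pvAny (PySem.Str.split₀ text) pvKeysLayanan = b2
  generalize pvAny (PySem.Str.split₀ text) pvKeysAnggaran = b3
  cases b1 <;> cases b2 <;> cases b3 <;> rfl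

-- ===== VERDICT =====
theorem get_aspects_spec : Claim_equal_get_aspects := by
  intro text _
  unfold Spec_get_aspects
  exact get_aspects_eq_alt text
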